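/- GENERATED by mk_final_copies.py from the proof of the farm's unit `vorbis_decode_packet_rest.10` (farm:vorbis_decode_packet_rest.10.1: Lemmas.lean) as the
   re-elaboration sweep compiled it — do not edit. -/
import Asan.CheckWalk
import Vorbis.Spec.Units.vorbis_decode_packet_rest_10
import Vorbis.Spec.PacketRestFrame

/-!
  LEMMAS OF UNIT vorbis_decode_packet_rest.10 (inverse coupling, 0x1116af … 0x11181a; C lines 3357–3374).

  PURE PART. `stable_stores`: `Stable` (CONTRACTS' STABLE) is carried over a batch of stores of this segment — scratch slots of
  the own frame (`[rsp − 8, rsp + 0x28)`) and dwords inside a channel buffer (`DecodeInv.frame_stores`, `StoreOK.off` /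
  `StoreOK.buffer`). The two stack arguments `[e.rsp + 8, e.rsp + 24)` may reach up to 800010H (`AtEntry.top` gives only
  `e.rsp + 8 ≤ 800000H`), and an arena above the stack may begin at 800000H (AR1x): they are kept over a store into a channel
  buffer because a setup block of the arena begins 32 bytes above the arena's base (`ArenaOK.block_range`). `kept_*`: what reads
  the same after such a batch; `site_map`, `chan_site`, `cb_slot_site`, `cb_site`: the check sites (MP1, MP2 / MP4, OB1 / HD1, M6);
  `Outer`, `Inner`: the invariants of the two loops; `inner_step`: the inner invariant after one round.

  THE WALKS. `entry_to_outer` (0x1116af → 0x1117a6), `outer_body` (0x1117a6 → exit 0x11181f | inner head 0x1116f7),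
  `inner_body` (0x1116f7 → 0x1116f7 | 0x1117a6), `inner_loop`, `outer_loop` (`ReachVia.loop`), `seg10` (the segment).
-/

namespace Vorbis.Spec.vorbis_decode_packet_rest_10
open X86 X86.User Asan Vorbis Vorbis.Spec Vorbis.Spec.vorbis_decode_packet_rest

set_option maxRecDepth 4000
set_option maxHeartbeats 4000000

/-- **What a store span of this segment may be** (`mem`: the memory before the batch of stores): the scratch area of the own
frame — the return address of a check call at `[rsp − 8, rsp)` and the spill slots `[rsp, rsp + 0x28)`, steady `rsp = e.rsp −
3000` — or bytes inside a channel buffer `channel_buffers[c]`, `c < C` (`4·b1` bytes: M6). -/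
def OkSpan (mem : Mem) (e : State) (s : Span) : Prop :=
  s.lo ≤ s.hi ∧
  (((e.reg .rsp).toNat - 3008 ≤ s.lo ∧ s.hi ≤ (e.reg .rsp).toNat - 2960) ∨
    (∃ c : Nat, (c : Int) < stb_vorbis.channels mem (fOf e) ∧ stb_vorbis.channel_buffers mem (fOf e) c ≤ s.lo ∧
      s.hi ≤ stb_vorbis.channel_buffers mem (fOf e) c + 4 * bsize mem (fOf e) 1))

variable {u₀ : State} {others : List Obj} {frames : List (Nat × FrameLayout)} {len : Nat} {Ar : Arena}
  {stored room : Int} {mode : Nat} {ysz : Nat → Nat} {e : State} {ret : Word}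

/-- The configuration windows of `*f` read at a cut point as at the function's entry (`Frame.same` + every span of the
function's footprint is a decode-time store). -/
theorem objEq_entry {ls : Int} {v : State}
    (hst : Stable u₀ others frames len Ar stored room mode ysz e ret ls v) :
    ObjEq ConfigOK.wins e.mem (fOf e) v.mem (fOf e) := by
  have he_room : 0x700000 + 3856 ≤ (e.reg .rsp).toNat := hst.entry.room
  have hpre := hst.pre
  have hinv0 := hpre.2.1
  have hd : DecodeSame (fOf e) e.mem v.mem :=
    StoreOK.decodeSame hinv0.ok hinv0.ob1 hinv0.sep hst.same (fun s hs => footprint_storeOK hpre he_room s hs)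
  exact hd.sub ConfigOK.wins_decode

/-- A store batch of this segment, span by span: a decode-time store (`StoreOK`), and where it lies — below the shadow; in the
scratch area, or off the stack region. -/
theorem okSpan_facts {ls : Int} {v : State}
    (hst : Stable u₀ others frames len Ar stored room mode ysz e ret ls v) {s : Span} (h : OkSpan v.mem e s) :
    StoreOK (RunBlk Ar len) v.mem (fOf e) s ∧ s.lo ≤ s.hi ∧ 0x100000 ≤ s.lo ∧ s.hi ≤ 0xC00000 ∧
      (((e.reg .rsp).toNat - 3008 ≤ s.lo ∧ s.hi ≤ (e.reg .rsp).toNat - 2960) ∨ s.hi ≤ 0x700000 ∨ 0x800020 ≤ s.lo) ∧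
      ((objBlock (fOf e)).base + (objBlock (fOf e)).size ≤ s.lo ∨ s.hi ≤ (objBlock (fOf e)).base) := by
  have he_room : 0x700000 + 3856 ≤ (e.reg .rsp).toNat := hst.entry.room
  have he_top : (e.reg .rsp).toNat + 8 ≤ 0x800000 := hst.entry.top
  have hinv := hst.inv
  have hobst := hinv.offStack _ hinv.ob1
  obtain ⟨hwf, h⟩ := h
  rcases h with ⟨h1, h2⟩ | ⟨c, hc, h1, h2⟩
  · refine ⟨?_, hwf, ?_, ?_, Or.inl ⟨h1, h2⟩, ?_⟩
    · apply StoreOK.off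
      intro B hB
      have := hinv.offStack B hB
      omega
    · omega
    · omega
    · omega
  · have hblk : RunBlk Ar len ⟨stb_vorbis.channel_buffers v.mem (fOf e) c, 4 * bsize v.mem (fOf e) 1⟩ :=
      SampleBuf.blk hinv.config (SampleBuf.chan c hc)
    have hin := hinv.ok.inside _ hblk
    have hdis := hinv.sep.bufobj _ (SampleBuf.chan c hc)
    simp only [vblock] at hdis
    simp only [] at hin
    -- a channel buffer is a setup block of the arena: 32 bytes above the arena's base, and the arena is off the stack region
    have hr3 := hinv.config.header.HD3.range
    have hpos : 0 < bsize v.mem (fOf e) 1 := by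
      unfold bsize
      simp only [Nat.succ_ne_zero, if_false]
      omega
    have hab : Ar.Blk ⟨stb_vorbis.channel_buffers v.mem (fOf e) c, 4 * bsize v.mem (fOf e) 1⟩ := by
      rcases hinv.buf _ (SampleBuf.chan c hc) with h0 | hb
      · simp only [] at h0
        omega
      · exact hb
    have hrange := hinv.arena.block_range (p := stb_vorbis.channel_buffers v.mem (fOf e) c)
      (n := 4 * bsize v.mem (fOf e) 1) hab
    have h1x := hinv.arena.AR1x
    have hAR2 := hinv.arena.AR2
    have hr8 := le_r8 (4 * bsize v.mem (fOf e) 1)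
    refine ⟨StoreOK.buffer _ (SampleBuf.chan c hc) h1 h2, hwf, ?_, ?_, ?_, ?_⟩
    · omega
    · omega
    · omega
    · simp only [vblock]
      omega

/-- What a batch of this segment's stores keeps, besides `Stable`: `*f` and every block the configuration reads (the mapping
table and the `chan` blocks among them). -/
structure KeptAll (Ar : Arena) (len : Nat) (f : Nat) (mem mem' : Mem) : Prop where
  /-- `*f` reads the same -/
  obj : (objBlock f).Kept mem mem'
  /-- every configuration block reads the same -/
  reads : ∀ B, ConfigOK.Reads mem f B → B.Kept mem mem'

/-- **`Stable` OVER A BATCH OF STORES OF THIS SEGMENT** (scratch slots of the own frame, dwords inside channel buffers), for a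
state `w` whose stack pointer, code span and DF / MXCSR the walker gives. -/
theorem stable_stores {ls : Int} {v w : State}
    (hst : Stable u₀ others frames len Ar stored room mode ysz e ret ls v)
    (hrsp : w.reg .rsp = spOf e) (hcode : Vorbis.CodeOK u₀ w.mem) (habi : abiInv w)
    {spans : List Span} (hs : Mem.SameExcept spans v.mem w.mem) (hok : ∀ s, s ∈ spans → OkSpan v.mem e s) :
    Stable u₀ others frames len Ar stored room mode ysz e ret ls w ∧ KeptAll Ar len (fOf e) v.mem w.mem := by
  have he_room : 0x700000 + 3856 ≤ (e.reg .rsp).toNat := hst.entry.room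
  have he_top : (e.reg .rsp).toNat + 8 ≤ 0x800000 := hst.entry.top
  have hpre := hst.pre
  obtain ⟨hsh, hinv0, hargsP⟩ := hpre
  have hinv := hst.inv
  have hcfg := hinv.config
  have hfacts := fun s (h : s ∈ spans) => okSpan_facts hst (hok s h)
  have hw : ∀ s, s ∈ spans → StoreOK (RunBlk Ar len) v.mem (fOf e) s := fun s h => (hfacts s h).1
  -- no store went to the shadow
  have hun : ShadowUntouched v.mem w.mem := by
    apply hs.eqOn
    intro s h
    have := (hfacts s h).2.2.2.1
    omega
  -- `*f` and the configuration blocks are kept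
  have hkobj : (objBlock (fOf e)).Kept v.mem w.mem := by
    apply Block.Kept.of_sameExcept hs _ (hinv.ok.no_wrap hinv.ob1)
    intro s h
    exact (hfacts s h).2.2.2.2.2
  have hkreads : ∀ B, ConfigOK.Reads v.mem (fOf e) B → B.Kept v.mem w.mem :=
    StoreOK.reads_kept hcfg hinv.ok hinv.sep hs hw
  -- a read of the frame above the scratch area, or of the caller's argument slots
  have rd : ∀ (a : Word) (n : Nat), (e.reg .rsp).toNat - 2960 ≤ a.toNat → a.toNat + n ≤ 0x800010 →
      w.mem.readLE a n = v.mem.readLE a n := by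
    intro a n h1 h2
    apply hs.readLE a n (by omega)
    intro s h
    have := (hfacts s h).2.2.2.2.1
    omega
  refine ⟨?_, ⟨hkobj, hkreads⟩⟩
  have hoe : ObjEq ConfigOK.wins v.mem (fOf e) w.mem (fOf e) := ObjEq.of_kept_obj hkobj (by decide)
  have hoe0 : ObjEq ConfigOK.wins e.mem (fOf e) v.mem (fOf e) := objEq_entry hst
  -- the mutable part of the invariant: nothing of `*f` changed
  have hinv' : DecodeInv others (framesIn frames e) len Ar stored room ysz w.mem (fOf e) := by
    have hv := hinv.fb.vorbis
    have hb := hv.bits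
    refine hinv.frame_stores hs hw (hinv.fb.env.eqOn hun) ?_ (fun _ => ?_) (fun _ => ?_) (fun _ => ?_)
    · exact ADO.transfer hinv.fb.ado (ObjEq.of_kept_obj hkobj (by decide))
    · exact hb.transfer (ObjEq.of_kept_obj hkobj (by decide)) ⟨hb.OB1, hb.OB1a⟩ hb.OBR hb.S2
    · exact hv.buffers.M7.transfer (ObjEq.of_kept_obj hkobj (by decide))
    · exact hv.w1.transfer (ObjEq.of_kept_obj hkobj (by decide))
  -- the footprint
  have hsame' : Mem.SameExcept ((vorbis_decode_packet_rest.spec others frames len Ar stored room mode ysz).footprint e)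
      e.mem w.mem := by
    apply hst.same.step_same hs
    intro s h a h1 h2
    apply covered_footprint
    obtain ⟨_, hk⟩ := hok s h
    rcases hk with ⟨k1, k2⟩ | ⟨c, hc, k1, k2⟩
    · left
      omega
    · right
      right
      right
      left
      obtain ⟨ech, eb1, eptr⟩ := ConfigOK.buffers_eq hoe0 hinv0.config.header.HD1.2
      rw [ech] at hc
      have hc0 := hc
      rw [← ech] at hc
      refine ⟨c, ?_, ?_, ?_⟩
      · rw [nchan_def]
        have := hinv0.config.header.HD1
        omega
      · rw [← (eptr c hc0).1]
        omega
      · rw [← (eptr c hc0).1, ← eb1]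
        omega
  -- the value of `n`: `blocksize[m->blockflag]` is read inside `*f`
  have hn : nOf w.mem (fOf e) (mOf e) = nOf v.mem (fOf e) (mOf e) := by
    have hm := hargsP.m_eq
    have hmode := hargsP.mode_lt
    have hmd := hinv0.config.mode.MD1
    unfold nOf bsize
    have e1 : Mode.blockflag w.mem (mOf e) = Mode.blockflag v.mem (mOf e) := by
      simp only [vacc, voff] at hm ⊢
      apply hkobj.u8
      · simp only [vblock]
        omega
      · simp only [vblock, voff]
        omega
    have e2 : stb_vorbis.blocksize_0 w.mem (fOf e) = stb_vorbis.blocksize_0 v.mem (fOf e) := by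
      simp only [vacc, voff]
      exact hkobj.i32 _ (by simp only [vblock]; omega) (by simp only [vblock, voff]; omega)
    have e3 : stb_vorbis.blocksize_1 w.mem (fOf e) = stb_vorbis.blocksize_1 v.mem (fOf e) := by
      simp only [vacc, voff]
      exact hkobj.i32 _ (by simp only [vblock]; omega) (by simp only [vblock, voff]; omega)
    rw [e1, e2, e3]
  -- where `p_left` points: into a caller's frame
  have hpl := hargsP.left_obj.1.where_ hsh.inv hsh.offText (by omega)
  have hpl2 := hargsP.left_obj.2
  have hsp : (spOf e).toNat = (e.reg .rsp).toNat - 3000 := by u_omega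
  have hra := hst.ra
  have h15 := hst.s_r15
  have h14 := hst.s_r14
  have h13 := hst.s_r13
  have h12 := hst.s_r12
  have hbp := hst.s_rbp
  have hbx := hst.s_rbx
  refine ⟨⟨hst.entry, hst.pre, hrsp, hcode, habi, hsame', ?_, ?_, ?_, ?_, ?_, ?_, ?_, hst.shadow.untouched hun, hinv'⟩,
    ?_, ?_, ?_, ?_, ?_, ?_, ?_, ?_, ?_, ?_, ?_⟩
  · rw [rd _ 8 (by u_omega) (by u_omega)]
    exact hra
  · rw [rd _ 8 (by u_omega) (by u_omega)]
    exact h15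
  · rw [rd _ 8 (by u_omega) (by u_omega)]
    exact h14
  · rw [rd _ 8 (by u_omega) (by u_omega)]
    exact h13
  · rw [rd _ 8 (by u_omega) (by u_omega)]
    exact h12
  · rw [rd _ 8 (by u_omega) (by u_omega)]
    exact hbp
  · rw [rd _ 8 (by u_omega) (by u_omega)]
    exact hbx
  · show w.mem.readLE (spOf e + 0x40) 8 = fOf e
    rw [rd _ 8 (by u_omega) (by u_omega)]
    exact hst.slot_f
  · show w.mem.readLE (spOf e + 0x68) 8 = lenOf e
    rw [rd _ 8 (by u_omega) (by u_omega)]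
    exact hst.slot_len
  · show w.mem.readLE (spOf e + 0x70) 8 = mOf e
    rw [rd _ 8 (by u_omega) (by u_omega)]
    exact hst.slot_m
  · show sint32 (w.mem.readLE (spOf e + 0x78) 4) = ls
    rw [rd _ 4 (by u_omega) (by u_omega)]
    exact hst.slot_ls
  · show sint32 (w.mem.readLE (spOf e + 0x7c) 4) = rsOf e
    rw [rd _ 4 (by u_omega) (by u_omega)]
    exact hst.slot_rs
  · show w.mem.readLE (spOf e + 0x50) 4 = nOf w.mem (fOf e) (mOf e)
    rw [rd _ 4 (by u_omega) (by u_omega), hn]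
    exact hst.slot_n
  · show w.mem.readLE (spOf e + 0x3c) 4 = nOf w.mem (fOf e) (mOf e) / 2
    rw [rd _ 4 (by u_omega) (by u_omega), hn]
    exact hst.slot_n2
  · show w.mem.readLE (spOf e + 0x60) 8 = sbOf e
    rw [rd _ 8 (by u_omega) (by u_omega)]
    exact hst.slot_sb
  · -- `right_end` at `[entry rsp + 8]`: possibly at 800000H, but below every arena block (`A.B + 32 ≤ p`, AR1x)
    rw [rd _ 4 (by u_omega) (by u_omega)]
    exact hst.arg_re
  · -- `p_left` at `[entry rsp + 16]`: the same
    rw [rd _ 8 (by u_omega) (by u_omega)]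
    exact hst.arg_left
  · -- `mem32[p_left]`: an object of a caller's frame
    have hk : (Block.mk (pLeftOf e) 4).Kept v.mem w.mem := by
      apply Block.Kept.of_sameExcept hs _ (by simp only []; omega)
      intro s h
      have := (hfacts s h).2.2.2.2.1
      simp only []
      omega
    rw [hk.i32 _ (by simp only []; omega) (by simp only []; omega)]
    exact hst.left_val

/-- `n = blocksize[m->blockflag]` is at most `b1` and at most 8192 (HD3). -/
theorem nOf_le (mem : Mem) (f m : Nat) (h : HeaderOK mem f) : nOf mem f m ≤ bsize mem f 1 ∧ bsize mem f 1 ≤ 8192 := by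
  have hr := h.HD3.range
  unfold nOf bsize
  simp only [Nat.succ_ne_zero, if_false]
  split <;> omega

/-- **THE INVARIANT OF THE OUTER LOOP, head 0x1117a6** (`for (i = map->coupling_steps-1; i >= 0; --i)`, line 3357), ghost `i`
(an integer, `−1 ≤ i < coupling_steps`): STABLE ∧ `r15 = map` ∧ `r13 = f` ∧ `ebp = i` ∧ `[0x20] = SB`. -/
structure Outer (u₀ : State) (others : List Obj) (frames : List (Nat × FrameLayout)) (len : Nat) (Ar : Arena)
    (stored room : Int) (mode : Nat) (ysz : Nat → Nat) (e : State) (ret : Word) (i : Int) (v : State) : Prop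
    extends Stable u₀ others frames len Ar stored room mode ysz e ret (lsOf e) v where
  rip : v.rip = Vorbis.L.vorbis_decode_packet_rest.loop10
  r15 : (v.reg .r15).toNat = mapOf v.mem (fOf e) (mOf e)
  r13 : (v.reg .r13).toNat = fOf e
  rbp : s32 (v.reg .rbp) = i
  i_ge : -1 ≤ i
  i_lt : i < (Mapping.coupling_steps v.mem (mapOf v.mem (fOf e) (mOf e)) : Int)
  slot_sb20 : slot64 e v 0x20 = sbOf e

/-- **THE INVARIANT OF THE INNER LOOP, head 0x1116f7** (`for (j=0; j < n2; ++j)`, line 3361), of coupling step `i` with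
`magnitude = mag`, `angle = ang` (channels), ghost `j ≤ n2`: STABLE ∧ `[0x0] = m' = channel_buffers[mag]` ∧ `r14 = a' =
channel_buffers[ang]` ∧ `r12 = j` ∧ `[0x8] = i` ∧ `[0x10] = map` ∧ `[0x18] = f` ∧ `[0x20] = SB`. -/
structure Inner (u₀ : State) (others : List Obj) (frames : List (Nat × FrameLayout)) (len : Nat) (Ar : Arena)
    (stored room : Int) (mode : Nat) (ysz : Nat → Nat) (e : State) (ret : Word) (i mag ang j : Nat) (v : State) : Prop
    extends Stable u₀ others frames len Ar stored room mode ysz e ret (lsOf e) v where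
  rip : v.rip = Vorbis.L.vorbis_decode_packet_rest.loop9
  i_lt : i < Mapping.coupling_steps v.mem (mapOf v.mem (fOf e) (mOf e))
  mag_lt : (mag : Int) < stb_vorbis.channels v.mem (fOf e)
  ang_lt : (ang : Int) < stb_vorbis.channels v.mem (fOf e)
  slot_mb : slot64 e v 0x0 = stb_vorbis.channel_buffers v.mem (fOf e) mag
  r14 : (v.reg .r14).toNat = stb_vorbis.channel_buffers v.mem (fOf e) ang
  r12 : v.reg .r12 = UInt64.ofNat j
  j_le : j ≤ nOf v.mem (fOf e) (mOf e) / 2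
  slot_i : slot32 e v 0x8 = i
  slot_map : slot64 e v 0x10 = mapOf v.mem (fOf e) (mOf e)
  slot_f18 : slot64 e v 0x18 = fOf e
  slot_sb20 : slot64 e v 0x20 = sbOf e

/-- The mode of the call is a mode of the decoder, in the memory of a cut point (the header fields read as at the entry). -/
theorem mode_lt_now {ls : Int} {v : State}
    (hst : Stable u₀ others frames len Ar stored room mode ysz e ret ls v) :
    (mode : Int) < stb_vorbis.mode_count v.mem (fOf e) := by
  have h0 := hst.pre.2.2.mode_lt
  have hoe0 := objEq_entry hst
  have e1 : stb_vorbis.mode_count v.mem (fOf e) = stb_vorbis.mode_count e.mem (fOf e) := by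
    simp only [vacc, voff]
    exact hoe0.i32 480 (by decide)
  rw [e1]
  exact h0

/-- **MP2 – MP6 of the mapping record of the call's mode** (`map = &f->mapping[m->mapping]`) in the memory of a cut point. -/
theorem mapAt_now {ls : Int} {v : State}
    (hst : Stable u₀ others frames len Ar stored room mode ysz e ret ls v) :
    MappingAtOK (RunBlk Ar len) v.mem (fOf e) (mapOf v.mem (fOf e) (mOf e)) := by
  have hcfg := hst.inv.config
  have hm := hst.pre.2.2.m_eq
  unfold mapOf
  rw [hm]
  exact hcfg.mapping.of_mode hcfg.mode (mode_lt_now hst)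

/-- **A check site inside the 56-byte mapping record** `map + off` (MP1), and where the record lies. -/
theorem site_map {ls : Int} {v : State}
    (hst : Stable u₀ others frames len Ar stored room mode ysz e ret ls v) (off n : Nat) (hoff : off + n ≤ 56) (hn : 1 ≤ n) :
    Site (LiveSet others (framesIn frames e)) (mapOf v.mem (fOf e) (mOf e) + off) n ∧
      0x100000 ≤ mapOf v.mem (fOf e) (mOf e) ∧ mapOf v.mem (fOf e) (mOf e) + 56 ≤ 0xC00000 ∧
      (mapOf v.mem (fOf e) (mOf e) + 56 ≤ 0x700000 ∨ 0x800000 ≤ mapOf v.mem (fOf e) (mOf e)) := by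
  have hinv := hst.inv
  have hcfg := hinv.config
  have hm := hst.pre.2.2.m_eq
  have hi := hcfg.mode.mapping_lt (mode_lt_now hst)
  have hblk := hcfg.mapping.MP1_block
  have hin := hinv.ok.inside _ hblk
  have hoff' := hinv.offStack _ hblk
  have h1 := hcfg.mapping.MP1
  refine ⟨?_, ?_⟩
  · apply hcfg.mapping.site_record hinv.live hi off n (by simp only [voff]; omega) hn
    unfold mapOf
    rw [hm]
  · unfold mapOf
    rw [hm]
    simp only [vacc, voff] at hin hoff' hi ⊢
    omega

/-- `n = blocksize[m->blockflag]` reads the same when `*f` is kept (`m` is a record of `mode_config[64]`, inside `*f`). -/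
theorem kept_nOf {ls : Int} {v : State} {mem' : Mem}
    (hst : Stable u₀ others frames len Ar stored room mode ysz e ret ls v)
    (hkobj : (objBlock (fOf e)).Kept v.mem mem') : nOf mem' (fOf e) (mOf e) = nOf v.mem (fOf e) (mOf e) := by
  obtain ⟨_, hinv0, hargsP⟩ := hst.pre
  have hm := hargsP.m_eq
  have hmode := hargsP.mode_lt
  have hmd := hinv0.config.mode.MD1
  unfold nOf bsize
  have e1 : Mode.blockflag mem' (mOf e) = Mode.blockflag v.mem (mOf e) := by
    simp only [vacc, voff] at hm ⊢
    apply hkobj.u8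
    · simp only [vblock]
      omega
    · simp only [vblock, voff]
      omega
  have e2 : stb_vorbis.blocksize_0 mem' (fOf e) = stb_vorbis.blocksize_0 v.mem (fOf e) := by
    simp only [vacc, voff]
    exact hkobj.i32 _ (by simp only [vblock]; omega) (by simp only [vblock, voff]; omega)
  have e3 : stb_vorbis.blocksize_1 mem' (fOf e) = stb_vorbis.blocksize_1 v.mem (fOf e) := by
    simp only [vacc, voff]
    exact hkobj.i32 _ (by simp only [vblock]; omega) (by simp only [vblock, voff]; omega)
  rw [e1, e2, e3]

/-- `map = &f->mapping[m->mapping]` reads the same when `*f` is kept. -/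
theorem kept_mapOf {ls : Int} {v : State} {mem' : Mem}
    (hst : Stable u₀ others frames len Ar stored room mode ysz e ret ls v)
    (hkobj : (objBlock (fOf e)).Kept v.mem mem') : mapOf mem' (fOf e) (mOf e) = mapOf v.mem (fOf e) (mOf e) := by
  obtain ⟨_, hinv0, hargsP⟩ := hst.pre
  have hm := hargsP.m_eq
  have hmode := hargsP.mode_lt
  have hmd := hinv0.config.mode.MD1
  unfold mapOf
  have e1 : Mode.mapping mem' (mOf e) = Mode.mapping v.mem (mOf e) := by
    simp only [vacc, voff] at hm ⊢
    apply hkobj.u8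
    · simp only [vblock]
      omega
    · simp only [vblock, voff]
      omega
  have e2 : stb_vorbis.mapping mem' (fOf e) = stb_vorbis.mapping v.mem (fOf e) := by
    simp only [vacc, voff]
    exact hkobj.ptr _ (by simp only [vblock]; omega) (by simp only [vblock, voff]; omega)
  simp only [stb_vorbis.mapping_at]
  rw [e1, e2]

/-- `channels`, `b1` and the pointers `channel_buffers[c]`, `c < 16`, read the same when `*f` is kept. -/
theorem kept_chan {f : Nat} {mem mem' : Mem} (hkobj : (objBlock f).Kept mem mem') :
    stb_vorbis.channels mem' f = stb_vorbis.channels mem f ∧ bsize mem' f 1 = bsize mem f 1 ∧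
      ∀ c : Nat, c < 16 → stb_vorbis.channel_buffers mem' f c = stb_vorbis.channel_buffers mem f c := by
  refine ⟨?_, ?_, ?_⟩
  · simp only [vacc, voff]
    exact hkobj.i32 _ (by simp only [vblock]; omega) (by simp only [vblock, voff]; omega)
  · unfold bsize
    simp only [Nat.succ_ne_zero, if_false, vacc, voff]
    rw [hkobj.i32 _ (by simp only [vblock]; omega) (by simp only [vblock, voff]; omega)]
  · intro c hc
    simp only [vacc, voff]
    exact hkobj.ptr _ (by simp only [vblock]; omega) (by simp only [vblock, voff]; omega)

/-- `map->coupling_steps` reads the same when the mapping table is kept. -/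
theorem kept_coupling {ls : Int} {v : State} {mem' : Mem}
    (hst : Stable u₀ others frames len Ar stored room mode ysz e ret ls v)
    (hk : KeptAll Ar len (fOf e) v.mem mem') :
    Mapping.coupling_steps mem' (mapOf v.mem (fOf e) (mOf e)) = Mapping.coupling_steps v.mem (mapOf v.mem (fOf e) (mOf e)) := by
  have hcfg := hst.inv.config
  have hm := hst.pre.2.2.m_eq
  have hi := hcfg.mode.mapping_lt (mode_lt_now hst)
  have h1 := hcfg.mapping.MP1
  have hkt := hk.reads _ (ConfigOK.Reads.mapping MappingOK.Owns.table)
  unfold mapOf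
  rw [hm]
  have hb := hkt.u16 (stb_vorbis.mapping_at v.mem (fOf e) (Mode.mapping v.mem (stb_vorbis.mode_config_at (fOf e) mode)) + 0)
  simp only [vacc, voff, Mem.ptr] at hi h1 hb ⊢
  exact hb (by omega) (by omega)


/-- The value of `ebp` after `movzx eax, WORD PTR [r15] ; lea ebp, [rax − 1]`: `coupling_steps − 1`, signed. -/
theorem ebp_init (cs : Nat) (h : cs < 65536) :
    s32 (Word.ofBV (BitVec.setWidth 32 (Word.ofBV (BitVec.zeroExtend 32 (BitVec.ofNat 16 cs)) - 1).toBitVec)) = (cs : Int) - 1 := by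
  show (Word.part .w32 _).toInt = _
  rw [part32_toInt]
  have e1 : (Word.ofBV (BitVec.setWidth 32 (Word.ofBV (BitVec.zeroExtend 32 (BitVec.ofNat 16 cs)) - 1).toBitVec)).toNat
      = (2 ^ 64 - 1 + cs) % 2 ^ 64 % 2 ^ 32 := by
    have e1' : (1 : Word).toNat = 1 := rfl
    rw [toNat_ofBV32, BitVec.toNat_setWidth, UInt64.toNat_toBitVec, UInt64.toNat_sub, toNat_ofBV32, e1']
    simp only [BitVec.truncate_eq_setWidth, BitVec.toNat_setWidth, BitVec.toNat_ofNat]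
    omega
  rw [e1]
  have := sint32_cases ((2 ^ 64 - 1 + cs) % 2 ^ 64 % 2 ^ 32 % 2 ^ 32)
  omega

/-- `js` taken after `test ebp, ebp`: `i < 0`. -/
theorem msb_neg (x : BitVec 32) (h : x.msb = true) : x.toInt < 0 := by
  rw [BitVec.msb_eq_decide] at h
  rw [BitVec.toInt_eq_toNat_cond]
  simp only [decide_eq_true_eq] at h
  have := x.isLt
  split <;> omega

/-- `js` not taken: `i ≥ 0`, and the signed and unsigned readings agree. -/
theorem msb_nonneg (x : BitVec 32) (h : x.msb = false) : x.toInt = (x.toNat : Int) ∧ x.toNat < 2 ^ 31 := by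
  rw [BitVec.msb_eq_decide] at h
  rw [BitVec.toInt_eq_toNat_cond]
  simp only [decide_eq_false_iff_not, Nat.not_le] at h
  have := x.isLt
  constructor
  · split <;> omega
  · omega

/-- `movsxd rax, ebp ; lea rbx, [rax + rax*2] ; add rbx, [r15 + 8]`: `rbx = chan + 3·i` for `i ≥ 0`. -/
theorem rbx_val (x : BitVec 32) (k ch : Nat) (hx : x.toNat = k) (hk : k < 2 ^ 31) (hch : ch + 3 * k < 2 ^ 64) :
    Word.ofBV (BitVec.signExtend 64 x) + Word.ofBV (BitVec.signExtend 64 x) * 2 + UInt64.ofNat ch = addr (ch + 3 * k) := by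
  apply eq_addr
  have e2 : (2 : Word).toNat = 2 := rfl
  have hs := toNat_sext32 x (by omega)
  rw [UInt64.toNat_add, UInt64.toNat_add, UInt64.toNat_mul, hs, e2, hx, UInt64.toNat_ofNat']
  omega

/-- `movzx eax, BYTE PTR [m]` of a byte value, as an address. -/
theorem zx8 (n : Nat) (h : n < 256) : Word.ofBV (BitVec.zeroExtend 32 (BitVec.ofNat 8 n)) = addr n := by
  rw [ofBV_eq_addr _ (by decide), BitVec.toNat_setWidth, BitVec.toNat_ofNat]
  congr 1
  omega


/-- A scratch span of the own frame is a legal store span of the segment. -/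
theorem okSpan_scratch (mem : Mem) (e : State) :
    ∀ s, s ∈ [(⟨(e.reg .rsp).toNat - 3008, (e.reg .rsp).toNat - 2960⟩ : Span)] → OkSpan mem e s := by
  intro s hs
  rw [List.mem_singleton] at hs
  subst hs
  exact ⟨by simp only []; omega, Or.inl ⟨Nat.le_refl _, Nat.le_refl _⟩⟩

/-- **A check site inside `map->chan[k]`, `k < coupling_steps`** (MP2, MP4), and where the three bytes lie. -/
theorem chan_site {ls : Int} {v : State}
    (hst : Stable u₀ others frames len Ar stored room mode ysz e ret ls v) {k : Nat}
    (hk : k < Mapping.coupling_steps v.mem (mapOf v.mem (fOf e) (mOf e))) (off n : Nat) (hoff : off + n ≤ 3) (hn : 1 ≤ n) :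
    Site (LiveSet others (framesIn frames e)) (Mapping.chan v.mem (mapOf v.mem (fOf e) (mOf e)) + 3 * k + off) n ∧
      0x100000 ≤ Mapping.chan v.mem (mapOf v.mem (fOf e) (mOf e)) ∧
      Mapping.chan v.mem (mapOf v.mem (fOf e) (mOf e)) + 3 * k + 3 ≤ 0xC00000 ∧
      (Mapping.chan v.mem (mapOf v.mem (fOf e) (mOf e)) + 3 * k + 3 ≤ 0x700000 ∨
        0x800000 ≤ Mapping.chan v.mem (mapOf v.mem (fOf e) (mOf e))) := by
  have hinv := hst.inv
  have hat := mapAt_now hst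
  have hblk := hat.MP2
  have hin := hinv.ok.inside _ hblk
  have hoff' := hinv.offStack _ hblk
  have h4 := hat.MP4_steps
  have hC := hinv.config.header.HD1
  refine ⟨?_, ?_⟩
  · apply hat.site_chan_step hinv.live hk off n (by simp only [voff]; omega) hn
    simp only [vacc, voff]
  · simp only [nchan_def, voff] at hin hoff'
    omega

/-- **The check site of the pointer slot `f->channel_buffers[c]`, `c < C`** (OB1, HD1), and where `*f` lies. -/
theorem cb_slot_site {ls : Int} {v : State}
    (hst : Stable u₀ others frames len Ar stored room mode ysz e ret ls v) {c : Nat}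
    (hc : (c : Int) < stb_vorbis.channels v.mem (fOf e)) :
    Site (LiveSet others (framesIn frames e)) (fOf e + 872 + 8 * c) 8 ∧ c < 16 ∧
      0x100000 ≤ fOf e ∧ fOf e + 1808 ≤ 0xC00000 ∧ (fOf e + 1808 ≤ 0x700000 ∨ 0x800000 ≤ fOf e) := by
  have hinv := hst.inv
  have hC := hinv.config.header.HD1
  have hin := hinv.ok.inside _ hinv.ob1
  have hoff := hinv.offStack _ hinv.ob1
  refine ⟨?_, by omega, ?_⟩
  · apply site_channel_buffer_slot hinv.live hinv.ob1 hC.2 hc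
    simp only [voff]
  · simp only [vblock, voff] at hin hoff
    omega

/-- **The check site of `channel_buffers[c][j]`, `c < C`, `j < n2`** (M6; `n2 = n / 2 ≤ b1 / 2`), and where the buffer lies:
above the image's text, in the data space, off the stack region. -/
theorem cb_site {ls : Int} {v : State}
    (hst : Stable u₀ others frames len Ar stored room mode ysz e ret ls v) {c : Nat}
    (hc : (c : Int) < stb_vorbis.channels v.mem (fOf e)) {j : Nat} (hj : j < nOf v.mem (fOf e) (mOf e) / 2) :
    Site (LiveSet others (framesIn frames e)) (stb_vorbis.channel_buffers v.mem (fOf e) c + 4 * j) 4 ∧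
      4 * j + 4 ≤ 4 * bsize v.mem (fOf e) 1 ∧ j < 4096 ∧
      0x119d40 ≤ stb_vorbis.channel_buffers v.mem (fOf e) c ∧
      stb_vorbis.channel_buffers v.mem (fOf e) c + 4 * bsize v.mem (fOf e) 1 ≤ 0xC00000 ∧
      (stb_vorbis.channel_buffers v.mem (fOf e) c + 4 * bsize v.mem (fOf e) 1 ≤ 0x700000 ∨
        0x800000 ≤ stb_vorbis.channel_buffers v.mem (fOf e) c) := by
  have hinv := hst.inv
  have hcfg := hinv.config
  have hn := nOf_le v.mem (fOf e) (mOf e) hcfg.header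
  have hblk := (hcfg.m6 c hc).1
  have hoff := hinv.offStack _ hblk
  have hlive := hinv.chanLive hc (by omega)
  have hw := hlive.where_ hst.shadow hst.pre.1.offText (by omega)
  refine ⟨?_, by omega, by omega, hw.1, hw.2.1, ?_⟩
  · apply site_channel_buffer hinv.live (fun c hc => (hcfg.m6 c hc).1) hc hj (by omega)
    simp only [vacc]
  · simp only [] at hoff
    omega

/-- The low half of a small number in a register. -/
theorem part32_ofNat (j : Nat) (hj : j < 2 ^ 31) : (Word.part .w32 (UInt64.ofNat j)).toNat = j := by
  rw [part32_toNat, UInt64.toNat_ofNat']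
  omega

/-- `movsxd rbx, r12d ; shl rbx, 2`: `rbx = 4·j`. -/
theorem idx4 (j : Nat) (hj : j < 2 ^ 31) :
    Word.ofBV (BitVec.signExtend 64 (Word.part .w32 (UInt64.ofNat j))) <<< 2 = addr (4 * j) := by
  apply eq_addr
  have hs := toNat_sext32 (Word.part .w32 (UInt64.ofNat j)) (by rw [part32_ofNat j hj]; exact hj)
  rw [part32_ofNat j hj] at hs
  rw [UInt64.toNat_shiftLeft, hs]
  have e2 : (2 : Word).toNat % 64 = 2 := rfl
  rw [e2, Nat.shiftLeft_eq]
  omega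

/-- `cmp r12d, eax ; jge`: the signed comparison of `j` with `n2`, as numbers. -/
theorem jcmp (n2 j : Nat) (hn : n2 ≤ 4096) (hj : j ≤ 4096) :
    ((BitVec.ofNat 32 n2).toInt ≤ (Word.part .w32 (UInt64.ofNat j)).toInt) ↔ n2 ≤ j := by
  rw [toInt_of_lt _ (by rw [toNat_ofNat32 _ (by omega)]; omega), toNat_ofNat32 _ (by omega),
    toInt_of_lt _ (by rw [part32_ofNat j (by omega)]; omega), part32_ofNat j (by omega)]
  omega

/-- `mov ebp, [rsp + 8] ; sub ebp, 1`: `i − 1`, signed. -/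
theorem ebp_dec (i : Nat) (h : i < 65536) : s32 (Word.ofBV (BitVec.ofNat 32 i - 1#32)) = (i : Int) - 1 := by
  show (Word.part .w32 _).toInt = _
  rw [part32_toInt, toNat_ofBV32, BitVec.toNat_sub]
  have e0 := toNat_ofNat32 i (by omega)
  have e1 : (1#32).toNat = 1 := rfl
  rw [e0, e1]
  have := sint32_cases ((2 ^ 32 - 1 + i) % 2 ^ 32 % 2 ^ 32)
  omega

/-- `add r12d, 1`: `r12 = j + 1` (zero-extended). -/
theorem r12_inc (j : Nat) (hj : j < 2 ^ 31) :
    Word.ofBV (Word.part .w32 (UInt64.ofNat j) + 1#32) = UInt64.ofNat (j + 1) := by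
  rw [ofBV_eq_addr _ (by decide), BitVec.toNat_add, part32_ofNat j hj]
  have e1 : (1#32).toNat = 1 := rfl
  rw [e1]
  show UInt64.ofNat _ = _
  congr 1
  show (j + 1) % 2 ^ 32 = j + 1
  omega

/-- **THE INNER LOOP'S INVARIANT AFTER ONE ROUND** (pure): the state `w` at the head again, the memory changed in the
return-address slot of the check calls, `m[j]` and `a[j]` only; `r12 = j + 1`, `r14` as before. -/
theorem inner_step {i mag ang j : Nat} {v w : State}
    (hat : Inner u₀ others frames len Ar stored room mode ysz e ret i mag ang j v)
    (hj : j < nOf v.mem (fOf e) (mOf e) / 2)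
    (hrip : w.rip = Vorbis.L.vorbis_decode_packet_rest.loop9) (hrsp : w.reg .rsp = spOf e)
    (hcode : Vorbis.CodeOK u₀ w.mem) (habi : abiInv w) (hr14 : w.reg .r14 = v.reg .r14)
    (hr12 : w.reg .r12 = UInt64.ofNat (j + 1))
    (hs : Mem.SameExcept [⟨(e.reg .rsp).toNat - 3008, (e.reg .rsp).toNat - 3000⟩,
      ⟨stb_vorbis.channel_buffers v.mem (fOf e) mag + 4 * j, stb_vorbis.channel_buffers v.mem (fOf e) mag + 4 * j + 4⟩,
      ⟨stb_vorbis.channel_buffers v.mem (fOf e) ang + 4 * j, stb_vorbis.channel_buffers v.mem (fOf e) ang + 4 * j + 4⟩]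
      v.mem w.mem) :
    Inner u₀ others frames len Ar stored room mode ysz e ret i mag ang (j + 1) w := by
  have hst := hat.toStable
  have he_room : 0x700000 + 3856 ≤ (e.reg .rsp).toNat := hst.entry.room
  have he_top : (e.reg .rsp).toNat + 8 ≤ 0x800000 := hst.entry.top
  obtain ⟨_, hm1, _, _, hm2, hm3⟩ := cb_site hst hat.mag_lt hj
  obtain ⟨_, ha1, _, _, ha2, ha3⟩ := cb_site hst hat.ang_lt hj
  have hC := hst.inv.config.header.HD1
  have hml := hat.mag_lt
  have hal := hat.ang_lt
  have hok : ∀ s, s ∈ [(⟨(e.reg .rsp).toNat - 3008, (e.reg .rsp).toNat - 3000⟩ : Span),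
      ⟨stb_vorbis.channel_buffers v.mem (fOf e) mag + 4 * j, stb_vorbis.channel_buffers v.mem (fOf e) mag + 4 * j + 4⟩,
      ⟨stb_vorbis.channel_buffers v.mem (fOf e) ang + 4 * j, stb_vorbis.channel_buffers v.mem (fOf e) ang + 4 * j + 4⟩] →
      OkSpan v.mem e s := by
    intro s hs'
    simp only [List.mem_cons, List.mem_nil_iff, or_false] at hs'
    rcases hs' with rfl | rfl | rfl
    · exact ⟨by simp only []; omega, Or.inl ⟨by simp only []; omega, by simp only []; omega⟩⟩
    · exact ⟨by simp only []; omega, Or.inr ⟨mag, hat.mag_lt, by simp only []; omega, by simp only []; omega⟩⟩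
    · exact ⟨by simp only []; omega, Or.inr ⟨ang, hat.ang_lt, by simp only []; omega, by simp only []; omega⟩⟩
  obtain ⟨hst', hkp⟩ := stable_stores hst hrsp hcode habi hs hok
  obtain ⟨ec, eb, ecb⟩ := kept_chan hkp.obj
  have hmap' := kept_mapOf hst hkp.obj
  have hcs' := kept_coupling hst hkp
  have hn' := kept_nOf hst hkp.obj
  -- a read of a spill slot `[rsp, rsp + 0x28)`: above the return-address slot, off the channel buffers
  have rd : ∀ (a : Word) (n : Nat), (e.reg .rsp).toNat - 3000 ≤ a.toNat → a.toNat + n ≤ 0x800000 →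
      w.mem.readLE a n = v.mem.readLE a n := by
    intro a n h1 h2
    apply hs.readLE a n (by omega)
    intro s hs'
    simp only [List.mem_cons, List.mem_nil_iff, or_false] at hs'
    rcases hs' with rfl | rfl | rfl <;> simp only [] <;> omega
  refine ⟨hst', hrip, ?_, ?_, ?_, ?_, ?_, hr12, ?_, ?_, ?_, ?_, ?_⟩
  · rw [hmap', hcs']
    exact hat.i_lt
  · rw [ec]
    exact hat.mag_lt
  · rw [ec]
    exact hat.ang_lt
  · show w.mem.readLE (spOf e + 0x0) 8 = _
    rw [rd _ 8 (by u_omega) (by u_omega), ecb mag (by omega)]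
    exact hat.slot_mb
  · rw [hr14, ecb ang (by omega)]
    exact hat.r14
  · rw [hn']
    omega
  · show w.mem.readLE (spOf e + 0x8) 4 = _
    rw [rd _ 4 (by u_omega) (by u_omega)]
    exact hat.slot_i
  · show w.mem.readLE (spOf e + 0x10) 8 = _
    rw [rd _ 8 (by u_omega) (by u_omega), hmap']
    exact hat.slot_map
  · show w.mem.readLE (spOf e + 0x18) 8 = _
    rw [rd _ 8 (by u_omega) (by u_omega)]
    exact hat.slot_f18
  · show w.mem.readLE (spOf e + 0x20) 8 = _
    rw [rd _ 8 (by u_omega) (by u_omega)]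
    exact hat.slot_sb20

/-! ### The walks -/

section walks
variable {Lay : Layout} {μ : Microarch}

/-- **0x1116af … 0x1117a6: from the segment's entry to the head of the outer loop** (`i = map->coupling_steps − 1`; the check
0x1116b7 load2 `map + 0` by MP1; `[rsp + 0x20] = SB`, `r13 = f`). -/
theorem entry_to_outer (hLay : Lay.hi = 0x1000000) (hμ : UserX.MicroOK μ)
    (hcode : HasCodeNat Lay u₀ Vorbis.L.vorbis_decode_packet_rest.entry Vorbis.Code.code_vorbis_decode_packet_rest.nat
      Vorbis.L.vorbis_decode_packet_rest.size)
    (hld2 : Asan.SmallCheck Lay μ Vorbis.WayInv (Vorbis.CodeOK u₀) [.rax, .rcx, .rdx] 2 Vorbis.L.__asan_load2_noabort.entry)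
    {v : State} (hat : At10 u₀ others frames len Ar stored room mode ysz e ret v) :
    ReachVia Lay μ Vorbis.WayInv v (fun w => ∃ i : Int, Outer u₀ others frames len Ar stored room mode ysz e ret i w) := by
  have he := hat.entry
  v_entry he
  have hst := hat.toStable
  -- the present state, under the walker's names
  have w_rip := hat.rip
  have c_rsp : v.reg .rsp = e.reg .rsp - 3000 := hat.rsp
  have w_eq : Mem.EqOn Vorbis.L.textLo Vorbis.L.textHi u₀.mem v.mem := hat.code
  have hdf : v.flags .df = false := (show abiInv _ from hat.abi).1
  have hmx : v.mxcsr &&& 0x1F80 = 0x1F80 := (show abiInv _ from hat.abi).2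
  have hsse := Vorbis.sseOK_of_abiInv hat.abi
  obtain ⟨mp, hmp⟩ : ∃ mp, mapOf v.mem (fOf e) (mOf e) = mp := ⟨_, rfl⟩
  have c_r15 : v.reg .r15 = addr mp := eq_addr _ _ (by rw [hat.r15, hmp])
  -- the slots and the field the segment loads
  have s8 : v.mem.readLE (e.reg .rsp - 2992) 8 = sbOf e := by
    have h := hat.slot_sb8
    simp only [slot64, spOf] at h
    rwa [show e.reg .rsp - 3000 + 8 = e.reg .rsp - 2992 by u_omega] at h
  have s40 : v.mem.readLE (e.reg .rsp - 2936) 8 = fOf e := by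
    have h := hat.slot_f
    simp only [slot64, spOf] at h
    rwa [show e.reg .rsp - 3000 + 64 = e.reg .rsp - 2936 by u_omega] at h
  have rcs : v.mem.readLE (addr mp) 2 = Mapping.coupling_steps v.mem mp := by
    simp only [vfield, vacc, voff, Nat.add_zero]
  obtain ⟨hsite, hmp1, hmp2, hmp3⟩ := site_map hst 0 2 (by omega) (by omega)
  rw [hmp] at hsite hmp1 hmp2 hmp3
  rw [Nat.add_zero] at hsite
  have hamp : (addr mp).toNat = mp := toNat_addr mp (by omega)
  have hcs16 : Mapping.coupling_steps v.mem mp < 65536 := by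
    simp only [vacc]
    exact Mem.u16_lt _ _
  u_walk hcode [hμ.vendor] until [Vorbis.L.vorbis_decode_packet_rest.loop10] span [Vorbis.L.textLo, Vorbis.L.textHi] side (v_side)
  · -- 0x1116b7: load2 map+0 (MP1)
    have hun : ShadowUntouched v.mem s_1116b7.mem := by v_untouched
    exact check_site hst.shadow hun hsite hamp
  · -- 0x1117a6, the head of the outer loop: `Outer` with `i = coupling_steps − 1`
    have hs : Mem.SameExcept [⟨(e.reg .rsp).toNat - 3008, (e.reg .rsp).toNat - 2960⟩] v.mem s_1116cd.mem := by u_same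
    have habi : abiInv s_1116cd := by v_inv
    obtain ⟨hst', hk⟩ := stable_stores hst w_rsp w_eq habi hs (okSpan_scratch _ _)
    have hmap' := kept_mapOf hst hk.obj
    have hcs' := kept_coupling hst hk
    rw [hmp] at hmap' hcs'
    refine ReachVia.done ⟨(Mapping.coupling_steps v.mem mp : Int) - 1, hst', w_rip, ?_, ?_, ?_, ?_, ?_, ?_⟩
    · rw [hmap', w_kept .r15 rfl, c_r15]
      exact hamp
    · rw [w_r13]
    · rw [w_rbp]
      exact ebp_init _ hcs16
    · omega
    · rw [hmap', hcs']
      omega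
    · show s_1116cd.mem.readLE (spOf e + 0x20) 8 = sbOf e
      rw [show spOf e + 0x20 = e.reg .rsp - 2968 by u_omega]
      u_resolve
      have hsb : sbOf e < 2 ^ 64 := by
        unfold sbOf
        omega
      exact UInt64.toNat_ofNat_of_lt' hsb

/-- **THE BODY OF THE OUTER LOOP up to the head of the inner loop, 0x1117a6 … 0x11181a → 0x1116f7** (lines 3357–3361), or the
segment's exit 0x11181f when `i < 0`. Five check sites: load8 `map + 8` (MP1), load1 `chan + 3i` and `chan + 3i + 1` (MP2, MP4),
load8 `f + 0x368 + 8·mag` and `+ 8·ang` (OB1; `mag, ang < C ≤ 16`: MP4, HD1). The walk is cut at the check calls 0x1117c1,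
0x1117d5, 0x1117e7, 0x1117fc, where the registers are restated as `addr` of a number. -/
theorem outer_body (hLay : Lay.hi = 0x1000000) (hμ : UserX.MicroOK μ)
    (hcode : HasCodeNat Lay u₀ Vorbis.L.vorbis_decode_packet_rest.entry Vorbis.Code.code_vorbis_decode_packet_rest.nat
      Vorbis.L.vorbis_decode_packet_rest.size)
    (hld8 : Asan.SmallCheck Lay μ Vorbis.WayInv (Vorbis.CodeOK u₀) [.rax, .rcx, .rdx] 8 Vorbis.L.__asan_load8_noabort.entry)
    (hld1 : Asan.SmallCheck Lay μ Vorbis.WayInv (Vorbis.CodeOK u₀) [.rax, .rdx] 1 Vorbis.L.__asan_load1_noabort.entry)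
    {i : Int} {v : State} (hat : Outer u₀ others frames len Ar stored room mode ysz e ret i v) :
    ReachVia Lay μ Vorbis.WayInv v (fun w => At11 u₀ others frames len Ar stored room mode ysz e ret w ∨
      ∃ k mag ang : Nat, (k : Int) = i ∧ Inner u₀ others frames len Ar stored room mode ysz e ret k mag ang 0 w) := by
  have he := hat.entry
  v_entry he
  have hst := hat.toStable
  have w_rip := hat.rip
  have c_rsp : v.reg .rsp = e.reg .rsp - 3000 := hat.rsp
  have w_eq : Mem.EqOn Vorbis.L.textLo Vorbis.L.textHi u₀.mem v.mem := hat.code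
  have hdf : v.flags .df = false := (show abiInv _ from hat.abi).1
  have hmx : v.mxcsr &&& 0x1F80 = 0x1F80 := (show abiInv _ from hat.abi).2
  have hsse := Vorbis.sseOK_of_abiInv hat.abi
  obtain ⟨mp, hmp⟩ : ∃ mp, mapOf v.mem (fOf e) (mOf e) = mp := ⟨_, rfl⟩
  have c_r15 : v.reg .r15 = addr mp := eq_addr _ _ (by rw [hat.r15, hmp])
  obtain ⟨f, hf⟩ : ∃ f, fOf e = f := ⟨_, rfl⟩
  have c_r13 : v.reg .r13 = addr f := eq_addr _ _ (by rw [hat.r13, hf])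
  have hrbp := hat.rbp
  obtain ⟨hsite8, hmp1, hmp2, hmp3⟩ := site_map hst 8 8 (by omega) (by omega)
  rw [hmp] at hsite8 hmp1 hmp2 hmp3
  have hamp8 : (addr mp + 8).toNat = mp + 8 := by
    rw [addr_add_lit]
    exact toNat_addr _ (by omega)
  have rchan : v.mem.readLE (addr mp + 8) 8 = Mapping.chan v.mem mp := by
    simp only [vfield, vacc, voff]
  have s20 : v.mem.readLE (e.reg .rsp - 2968) 8 = sbOf e := by
    have h := hat.slot_sb20
    simp only [slot64, spOf] at h
    rwa [show e.reg .rsp - 3000 + 32 = e.reg .rsp - 2968 by u_omega] at h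
  have hamp0 : (addr mp).toNat = mp := toNat_addr _ (by omega)
  have hilt := hat.i_lt
  rw [hmp] at hilt
  have hxi : (Word.part .w32 (v.reg .rbp)).toInt = i := hrbp
  obtain ⟨ch, hch⟩ : ∃ ch, Mapping.chan v.mem mp = ch := ⟨_, rfl⟩
  rw [hch] at rchan
  u_walk hcode [hμ.vendor] until [Vorbis.L.vorbis_decode_packet_rest.cut32, Vorbis.L.vorbis_decode_packet_rest.chk89] span [Vorbis.L.textLo, Vorbis.L.textHi] side (v_side)
  · -- 0x1117ae: load8 map+8 (MP1)
    have hun : ShadowUntouched v.mem s_1117ae.mem := by v_untouched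
    exact check_site hst.shadow hun hsite8 hamp8
  · -- the exit 0x11181f: `i < 0`
    have hs : Mem.SameExcept [⟨(e.reg .rsp).toNat - 3008, (e.reg .rsp).toNat - 2960⟩] v.mem s_1117a8.mem := by u_same
    have habi : abiInv s_1117a8 := by v_inv
    obtain ⟨hst', hk⟩ := stable_stores hst (by rw [w_kept .rsp rfl]; exact c_rsp) w_eq habi hs (okSpan_scratch _ _)
    have hmap' := kept_mapOf hst hk.obj
    rw [hmp] at hmap'
    refine ReachVia.done (Or.inl ⟨hst', w_rip, ?_, ?_⟩)
    · rw [hmap', w_kept .r15 rfl, c_r15]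
      exact toNat_addr _ (by omega)
    · show s_1117a8.mem.readLE (spOf e + 0x20) 8 = sbOf e
      rw [w_mem]
      exact hat.slot_sb20
  · -- 0x1117c1: `i ≥ 0`; rbx = chan + 3·i
    obtain ⟨hx1, hx2⟩ := msb_nonneg _ hbr_1117a8
    obtain ⟨k, hk⟩ : ∃ k, (Word.part .w32 (v.reg .rbp)).toNat = k := ⟨_, rfl⟩
    rw [hk] at hx1 hx2
    have hki : (k : Int) = i := by omega
    have hklt : k < Mapping.coupling_steps v.mem (mapOf v.mem (fOf e) (mOf e)) := by
      rw [hmp]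
      omega
    obtain ⟨hsite0, hch1, hch2, hch3⟩ := chan_site hst hklt 0 1 (by omega) (by omega)
    have hsite1 := (chan_site hst hklt 1 1 (by omega) (by omega)).1
    rw [hmp, hch] at hsite0 hsite1 hch1 hch2 hch3
    have hmapAt := mapAt_now hst
    have hmaglt := hmapAt.magnitude_lt hklt
    have hanglt := hmapAt.angle_lt hklt
    rw [hmp] at hmaglt hanglt
    obtain ⟨mag, hmag⟩ : ∃ mag, MappingChannel.magnitude v.mem (Mapping.chan_at v.mem mp k) = mag := ⟨_, rfl⟩
    obtain ⟨ang, hang⟩ : ∃ ang, MappingChannel.angle v.mem (Mapping.chan_at v.mem mp k) = ang := ⟨_, rfl⟩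
    rw [hmag] at hmaglt
    rw [hang] at hanglt
    have hch' := hch
    simp only [vacc, voff, Mem.ptr] at hch'
    have rmag : v.mem.readLE (addr (ch + 3 * k)) 1 = mag := by
      rw [← hmag]
      simp only [vfield, vacc, voff, Mem.ptr, hch', Nat.add_zero]
    have rang : v.mem.readLE (addr (ch + 3 * k) + 1) 1 = ang := by
      rw [← hang]
      simp only [vfield, vacc, voff, Mem.ptr, hch']
    have hach : (addr (ch + 3 * k)).toNat = ch + 3 * k := toNat_addr _ (by omega)
    have hach1 : (addr (ch + 3 * k) + 1).toNat = ch + 3 * k + 1 := by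
      rw [addr_add_lit]
      exact toNat_addr _ (by omega)
    replace w_rbx := w_rbx.trans (rbx_val _ k ch hk hx2 (by omega))
    replace w_rdi := w_rdi.trans (rbx_val _ k ch hk hx2 (by omega))
    clear w_rax hsite8 hmp1 hmp2 hmp3 hamp8 rchan hilt hxi hrbp
    u_walk hcode [hμ.vendor] until [Vorbis.L.vorbis_decode_packet_rest.chk90] span [Vorbis.L.textLo, Vorbis.L.textHi] side (v_side)
    · -- 0x1117c1: load1 chan + 3i (MP2, MP4)
      have hun : ShadowUntouched v.mem s_1117c1.mem := by v_untouched
      rw [Nat.add_zero] at hsite0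
      exact check_site hst.shadow hun hsite0 hach
    · -- 0x1117d5: rdi = &f->channel_buffers[mag]
      obtain ⟨hsitem, hm16, hf1, hf2, hf3⟩ := cb_slot_site hst hmaglt
      rw [hf] at hsitem hf1 hf2 hf3
      have hzx : Word.ofBV (BitVec.zeroExtend 32 (BitVec.ofNat 8 mag)) = addr mag := zx8 mag (by omega)
      rw [hzx] at w_r12 w_rdi w_rax
      simp only [vfield] at w_r12 w_rdi
      obtain ⟨mb, hmb⟩ : ∃ mb, stb_vorbis.channel_buffers v.mem f mag = mb := ⟨_, rfl⟩
      have hamb : (addr f + addr (mag + 108) * 8 + 8).toNat = f + 872 + 8 * mag := by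
        simp only [vfield]
        have hlt : f + (mag + 108) * 8 + 8 < 2 ^ 64 := by omega
        rw [toNat_addr _ hlt]
        omega
      have rmb : v.mem.readLE (addr f + addr (mag + 108) * 8 + 8) 8 = mb := by
        rw [← hmb]
        simp only [vfield, vacc, voff, Mem.ptr]
        have e1 : f + (mag + 108) * 8 + 8 = f + 872 + 8 * mag := by omega
        rw [e1]
      u_walk hcode [hμ.vendor] until [Vorbis.L.vorbis_decode_packet_rest.chk91] span [Vorbis.L.textLo, Vorbis.L.textHi] side (v_side)
      · -- 0x1117d5: load8 f + 0x368 + 8·mag (OB1; mag < C ≤ 16: MP4, HD1)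
        have hun : ShadowUntouched v.mem s_1117d5.mem := by v_untouched
        refine check_site hst.shadow hun hsitem ?_
        rw [toNat_addr _ (by omega)]
        omega
      · -- 0x1117e7: [rsp] = m'; rdi = chan + 3i + 1
        clear w_r12 rmb hamb rmag hach hsite0 hsitem
        u_walk hcode [hμ.vendor] until [Vorbis.L.vorbis_decode_packet_rest.chk92] span [Vorbis.L.textLo, Vorbis.L.textHi] side (v_side)
        · -- 0x1117e7: load1 chan + 3i + 1 (MP2, MP4)
          have hun : ShadowUntouched v.mem s_1117e7.mem := by v_untouched
          exact check_site hst.shadow hun hsite1 hach1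
        · -- 0x1117fc: rdi = &f->channel_buffers[ang]
          obtain ⟨hsitea, ha16, _, _, _⟩ := cb_slot_site hst hanglt
          rw [hf] at hsitea
          have hzx : Word.ofBV (BitVec.zeroExtend 32 (BitVec.ofNat 8 ang)) = addr ang := zx8 ang (by omega)
          rw [hzx] at w_rbx w_rdi w_rax
          simp only [vfield] at w_rbx w_rdi
          obtain ⟨ab, hab⟩ : ∃ ab, stb_vorbis.channel_buffers v.mem f ang = ab := ⟨_, rfl⟩
          have haab : (addr f + addr (ang + 108) * 8 + 8).toNat = f + 872 + 8 * ang := by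
            simp only [vfield]
            have hlt : f + (ang + 108) * 8 + 8 < 2 ^ 64 := by omega
            rw [toNat_addr _ hlt]
            omega
          have rab : v.mem.readLE (addr f + addr (ang + 108) * 8 + 8) 8 = ab := by
            rw [← hab]
            simp only [vfield, vacc, voff, Mem.ptr]
            have e1 : f + (ang + 108) * 8 + 8 = f + 872 + 8 * ang := by omega
            rw [e1]
          clear rang hach1 hsite1 hch1 hch2 hch3
          u_walk hcode [hμ.vendor] until [Vorbis.L.vorbis_decode_packet_rest.loop9] span [Vorbis.L.textLo, Vorbis.L.textHi] side (v_side)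
          · -- 0x1117fc: load8 f + 0x368 + 8·ang (OB1; ang < C ≤ 16: MP4, HD1)
            have hun : ShadowUntouched v.mem s_1117fc.mem := by v_untouched
            refine check_site hst.shadow hun hsitea ?_
            rw [toNat_addr _ (by omega)]
            omega
          · -- 0x1116f7, the head of the inner loop: `Inner k mag ang 0`
            have hs : Mem.SameExcept [⟨(e.reg .rsp).toNat - 3008, (e.reg .rsp).toNat - 2960⟩] v.mem s_11181a.mem := by u_same
            have habi : abiInv s_11181a := by v_inv
            obtain ⟨hst', hkp⟩ := stable_stores hst w_rsp w_eq habi hs (okSpan_scratch _ _)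
            obtain ⟨ec, eb, ecb⟩ := kept_chan hkp.obj
            have hmap' := kept_mapOf hst hkp.obj
            have hcs' := kept_coupling hst hkp
            have hmblt : mb < 2 ^ 64 := by
              rw [← hmb]
              simp only [vacc, Mem.ptr]
              exact Mem.u64_lt _ _
            have hablt : ab < 2 ^ 64 := by
              rw [← hab]
              simp only [vacc, Mem.ptr]
              exact Mem.u64_lt _ _
            rw [← hf] at hmb hab
            refine ReachVia.done (Or.inr ⟨k, mag, ang, hki, hst', w_rip, ?_, ?_, ?_, ?_, ?_, ?_, ?_, ?_, ?_, ?_, ?_⟩)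
            · rw [hmap', hcs']
              exact hklt
            · rw [ec]
              exact hmaglt
            · rw [ec]
              exact hanglt
            · show s_11181a.mem.readLE (spOf e + 0x0) 8 = _
              rw [ecb mag hm16, hmb, show spOf e + 0x0 = e.reg .rsp - 3000 by u_omega]
              u_resolve
              exact UInt64.toNat_ofNat_of_lt' hmblt
            · rw [w_r14, ecb ang ha16, hab]
              exact UInt64.toNat_ofNat_of_lt' hablt
            · rw [w_r12]
              rfl
            · exact Nat.zero_le _
            · show s_11181a.mem.readLE (spOf e + 0x8) 4 = k
              rw [show spOf e + 0x8 = e.reg .rsp - 2992 by u_omega]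
              u_resolve
              exact (Nat.mod_eq_of_lt (by omega)).trans hk
            · show s_11181a.mem.readLE (spOf e + 0x10) 8 = _
              rw [hmap', hmp, show spOf e + 0x10 = e.reg .rsp - 2984 by u_omega]
              u_resolve
            · show s_11181a.mem.readLE (spOf e + 0x18) 8 = _
              rw [hf, show spOf e + 0x18 = e.reg .rsp - 2976 by u_omega]
              u_resolve
              exact toNat_addr _ (by omega)
            · show s_11181a.mem.readLE (spOf e + 0x20) 8 = _
              rw [show spOf e + 0x20 = e.reg .rsp - 2968 by u_omega]
              u_resolve

/-- **ONE ROUND OF THE INNER LOOP, 0x1116f7 … 0x1116f3 → 0x1116f7** (lines 3361–3374; four paths through the two float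
comparisons, all into the common tail 0x1116e1), or its exit 0x111795 … 0x1117a3 → the head of the outer loop with `i − 1`. Check
sites: load4 `m' + 4j` (0x111716), load4 `a' + 4j` (0x111733 / 0x11175c), store4 `a' + 4j` (0x1116eb): M6 with `j < n2 ≤ b1 / 2`;
the store `m[j] = m2` at 0x1116e1 is unchecked (its address was checked at 0x111716). The float values are opaque. -/
theorem inner_body (hLay : Lay.hi = 0x1000000) (hμ : UserX.MicroOK μ)
    (hcode : HasCodeNat Lay u₀ Vorbis.L.vorbis_decode_packet_rest.entry Vorbis.Code.code_vorbis_decode_packet_rest.nat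
      Vorbis.L.vorbis_decode_packet_rest.size)
    (hst4 : Asan.SmallCheck Lay μ Vorbis.WayInv (Vorbis.CodeOK u₀) [.rax, .rcx, .rdx] 4 Vorbis.L.__asan_store4_noabort.entry)
    (hld4 : Asan.SmallCheck Lay μ Vorbis.WayInv (Vorbis.CodeOK u₀) [.rax, .rcx, .rdx] 4 Vorbis.L.__asan_load4_noabort.entry)
    {i mag ang j : Nat} {v : State} (hat : Inner u₀ others frames len Ar stored room mode ysz e ret i mag ang j v) :
    ReachVia Lay μ Vorbis.WayInv v (fun w =>
      Outer u₀ others frames len Ar stored room mode ysz e ret ((i : Int) - 1) w ∨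
      (Inner u₀ others frames len Ar stored room mode ysz e ret i mag ang (j + 1) w ∧ j < nOf v.mem (fOf e) (mOf e) / 2)) := by
  have he := hat.entry
  v_entry he
  have hst := hat.toStable
  have w_rip := hat.rip
  have c_rsp : v.reg .rsp = e.reg .rsp - 3000 := hat.rsp
  have w_eq : Mem.EqOn Vorbis.L.textLo Vorbis.L.textHi u₀.mem v.mem := hat.code
  have hdf : v.flags .df = false := (show abiInv _ from hat.abi).1
  have hmx : v.mxcsr &&& 0x1F80 = 0x1F80 := (show abiInv _ from hat.abi).2
  have hsse := Vorbis.sseOK_of_abiInv hat.abi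
  have c_r12 : v.reg .r12 = UInt64.ofNat j := hat.r12
  obtain ⟨n2, hn2⟩ : ∃ n2, nOf v.mem (fOf e) (mOf e) / 2 = n2 := ⟨_, rfl⟩
  obtain ⟨mb, hmb⟩ : ∃ mb, stb_vorbis.channel_buffers v.mem (fOf e) mag = mb := ⟨_, rfl⟩
  obtain ⟨ab, hab⟩ : ∃ ab, stb_vorbis.channel_buffers v.mem (fOf e) ang = ab := ⟨_, rfl⟩
  have c_r14 : v.reg .r14 = addr ab := eq_addr _ _ (by rw [hat.r14, hab])
  have s3c : v.mem.readLE (e.reg .rsp - 2940) 4 = n2 := by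
    have h := hat.slot_n2
    simp only [slot32, spOf] at h
    rw [hn2] at h
    rwa [show e.reg .rsp - 3000 + 60 = e.reg .rsp - 2940 by u_omega] at h
  have s0 : v.mem.readLE (e.reg .rsp - 3000) 8 = mb := by
    have h := hat.slot_mb
    simp only [slot64, spOf] at h
    rw [hmb] at h
    rwa [show e.reg .rsp - 3000 + 0 = e.reg .rsp - 3000 by u_omega] at h
  have s8 : v.mem.readLE (e.reg .rsp - 2992) 4 = i := by
    have h := hat.slot_i
    simp only [slot32, spOf] at h
    rwa [show e.reg .rsp - 3000 + 8 = e.reg .rsp - 2992 by u_omega] at h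
  have s10 : v.mem.readLE (e.reg .rsp - 2984) 8 = mapOf v.mem (fOf e) (mOf e) := by
    have h := hat.slot_map
    simp only [slot64, spOf] at h
    rwa [show e.reg .rsp - 3000 + 16 = e.reg .rsp - 2984 by u_omega] at h
  have s18 : v.mem.readLE (e.reg .rsp - 2976) 8 = fOf e := by
    have h := hat.slot_f18
    simp only [slot64, spOf] at h
    rwa [show e.reg .rsp - 3000 + 24 = e.reg .rsp - 2976 by u_omega] at h
  have hjle := hat.j_le
  rw [hn2] at hjle
  have hn2lt : n2 ≤ 4096 := by
    have := nOf_le v.mem (fOf e) (mOf e) hst.inv.config.header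
    omega
  u_walk hcode [hμ.vendor] until [Vorbis.L.vorbis_decode_packet_rest.loop10, Vorbis.L.vorbis_decode_packet_rest.chk85] span [Vorbis.L.textLo, Vorbis.L.textHi] side (v_side)
  · -- the exit of the inner loop (`j ≥ n2`): 0x111795 … 0x1117a3, `--i`, back to the head of the outer loop
    have hs : Mem.SameExcept [⟨(e.reg .rsp).toNat - 3008, (e.reg .rsp).toNat - 2960⟩] v.mem s_1117a3.mem := by u_same
    have habi : abiInv s_1117a3 := by v_inv
    obtain ⟨hst', hkp⟩ := stable_stores hst (by rw [w_kept .rsp rfl]; exact c_rsp) w_eq habi hs (okSpan_scratch _ _)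
    have hmap' := kept_mapOf hst hkp.obj
    have hcs' := kept_coupling hst hkp
    have hilt := hat.i_lt
    have hcs16 : Mapping.coupling_steps v.mem (mapOf v.mem (fOf e) (mOf e)) < 65536 := by
      simp only [vacc]
      exact Mem.u16_lt _ _
    obtain ⟨_, hmp1, hmp2, _⟩ := site_map hst 0 2 (by omega) (by omega)
    refine ReachVia.done (Or.inl ⟨hst', w_rip, ?_, ?_, ?_, ?_, ?_, ?_⟩)
    · rw [w_r15, hmap']
      have hlt : mapOf v.mem (fOf e) (mOf e) < 2 ^ 64 := by omega
      exact UInt64.toNat_ofNat_of_lt' hlt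
    · rw [w_r13]
    · rw [w_rbp]
      exact ebp_dec i (by omega)
    · omega
    · rw [hmap', hcs']
      omega
    · show s_1117a3.mem.readLE (spOf e + 0x20) 8 = _
      rw [w_mem]
      exact hat.slot_sb20
  · -- the body: `j < n2`; r13 = rdi = m' + 4j, rbx = 4j
    have hj : j < n2 := by
      have := mt (jcmp n2 j hn2lt (by omega)).mpr hbr_1116fe
      omega
    have hjn : j < nOf v.mem (fOf e) (mOf e) / 2 := by
      rw [hn2]
      exact hj
    obtain ⟨hsm, hm1, hj4, hm0, hm2, hm3⟩ := cb_site hst hat.mag_lt hjn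
    obtain ⟨hsa, ha1, _, ha0, ha2, ha3⟩ := cb_site hst hat.ang_lt hjn
    rw [hmb] at hsm hm0 hm2 hm3
    rw [hab] at hsa ha0 ha2 ha3
    obtain ⟨b1, hb1⟩ : ∃ b1, bsize v.mem (fOf e) 1 = b1 := ⟨_, rfl⟩
    rw [hb1] at hm1 hm2 hm3 ha1 ha2 ha3
    have hi4 := idx4 j (by omega)
    rw [hi4] at w_rdi w_r13 w_rbx
    have hmb' : UInt64.ofNat mb = addr mb := rfl
    rw [hmb'] at w_rdi w_r13 w_rax
    simp only [vfield] at w_rdi w_r13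
    have hA1 : (addr (mb + 4 * j)).toNat = mb + 4 * j := toNat_addr _ (by omega)
    have hA2 : (addr ab + addr (4 * j)).toNat = ab + 4 * j := by
      rw [addr_add_addr]
      exact toNat_addr _ (by omega)
    have hA3 : (addr (4 * j) + addr ab).toNat = ab + 4 * j := by
      rw [addr_add_addr, toNat_addr _ (by omega)]
      omega
    clear hbr_1116fe s3c hn2lt hjle
    u_walk hcode [hμ.vendor] until [Vorbis.L.vorbis_decode_packet_rest.loop9] span [Vorbis.L.textLo, Vorbis.L.textHi] side (v_side)
    · -- 0x111716: load4 m' + 4j (M6)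
      have hun : ShadowUntouched v.mem s_111716.mem := by v_untouched
      exact check_site hst.shadow hun hsm hA1
    · -- 0x11175c: load4 a' + 4j (M6), path m[j] ≤ 0
      have hun : ShadowUntouched v.mem s_11175c.mem := by v_untouched
      exact check_site hst.shadow hun hsa hA2
    · -- 0x1116eb: store4 a' + 4j
      have hun : ShadowUntouched v.mem s_1116eb.mem := by v_untouched
      exact check_site hst.shadow hun hsa hA3
    · have hun : ShadowUntouched v.mem s_1116eb.mem := by v_untouched
      exact check_site hst.shadow hun hsa hA3
    · -- 0x111733: load4 a' + 4j (M6), path m[j] > 0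
      have hun : ShadowUntouched v.mem s_111733.mem := by v_untouched
      exact check_site hst.shadow hun hsa hA2
    · have hun : ShadowUntouched v.mem s_1116eb.mem := by v_untouched
      exact check_site hst.shadow hun hsa hA3
    · have hun : ShadowUntouched v.mem s_1116eb.mem := by v_untouched
      exact check_site hst.shadow hun hsa hA3
    all_goals
      have hs : Mem.SameExcept [⟨(e.reg .rsp).toNat - 3008, (e.reg .rsp).toNat - 3000⟩,
          ⟨mb + 4 * j, mb + 4 * j + 4⟩, ⟨ab + 4 * j, ab + 4 * j + 4⟩] v.mem s_1116f3.mem := by u_same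
      have habi : abiInv s_1116f3 := by v_inv
      rw [← hmb, ← hab] at hs
      exact ReachVia.done (Or.inr ⟨inner_step hat hjn w_rip w_rsp w_eq habi (w_kept .r14 rfl)
        (w_r12.trans (r12_inc j (by omega))) hs, hjn⟩)

/-- **THE INNER LOOP**: from its invariant at the head 0x1116f7 to the head of the outer loop with `i − 1` (measure `4096 − j`:
`j ≤ n2 ≤ 4096` by HD3). -/
theorem inner_loop (hLay : Lay.hi = 0x1000000) (hμ : UserX.MicroOK μ)
    (hcode : HasCodeNat Lay u₀ Vorbis.L.vorbis_decode_packet_rest.entry Vorbis.Code.code_vorbis_decode_packet_rest.nat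
      Vorbis.L.vorbis_decode_packet_rest.size)
    (hst4 : Asan.SmallCheck Lay μ Vorbis.WayInv (Vorbis.CodeOK u₀) [.rax, .rcx, .rdx] 4 Vorbis.L.__asan_store4_noabort.entry)
    (hld4 : Asan.SmallCheck Lay μ Vorbis.WayInv (Vorbis.CodeOK u₀) [.rax, .rcx, .rdx] 4 Vorbis.L.__asan_load4_noabort.entry)
    (i mag ang : Nat) :
    ∀ v : State, (∃ j, Inner u₀ others frames len Ar stored room mode ysz e ret i mag ang j v) →
      ReachVia Lay μ Vorbis.WayInv v (fun w => Outer u₀ others frames len Ar stored room mode ysz e ret ((i : Int) - 1) w) := by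
  apply ReachVia.loop (fun v => 4096 - (v.reg .r12).toNat)
  intro v hv
  obtain ⟨j, hat⟩ := hv
  refine (inner_body hLay hμ hcode hst4 hld4 hat).mono ?_
  intro w hw
  rcases hw with ho | ⟨hin, hj⟩
  · exact Or.inl ho
  · refine Or.inr ⟨⟨j + 1, hin⟩, ?_⟩
    have hn := nOf_le v.mem (fOf e) (mOf e) hat.toStable.inv.config.header
    have hj1 : j < 2 ^ 64 := by omega
    have hj2 : j + 1 < 2 ^ 64 := by omega
    have e1 : (v.reg .r12).toNat = j := by
      rw [hat.r12]
      exact UInt64.toNat_ofNat_of_lt' hj1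
    have e2 : (w.reg .r12).toNat = j + 1 := by
      rw [hin.r12]
      exact UInt64.toNat_ofNat_of_lt' hj2
    show 4096 - (w.reg .r12).toNat < 4096 - (v.reg .r12).toNat
    rw [e1, e2]
    omega

/-- **THE OUTER LOOP**: from its invariant at the head 0x1117a6 to the segment's exit assertion `At11` (measure `i + 1`). -/
theorem outer_loop (hLay : Lay.hi = 0x1000000) (hμ : UserX.MicroOK μ)
    (hcode : HasCodeNat Lay u₀ Vorbis.L.vorbis_decode_packet_rest.entry Vorbis.Code.code_vorbis_decode_packet_rest.nat
      Vorbis.L.vorbis_decode_packet_rest.size)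
    (hst4 : Asan.SmallCheck Lay μ Vorbis.WayInv (Vorbis.CodeOK u₀) [.rax, .rcx, .rdx] 4 Vorbis.L.__asan_store4_noabort.entry)
    (hld4 : Asan.SmallCheck Lay μ Vorbis.WayInv (Vorbis.CodeOK u₀) [.rax, .rcx, .rdx] 4 Vorbis.L.__asan_load4_noabort.entry)
    (hld8 : Asan.SmallCheck Lay μ Vorbis.WayInv (Vorbis.CodeOK u₀) [.rax, .rcx, .rdx] 8 Vorbis.L.__asan_load8_noabort.entry)
    (hld1 : Asan.SmallCheck Lay μ Vorbis.WayInv (Vorbis.CodeOK u₀) [.rax, .rdx] 1 Vorbis.L.__asan_load1_noabort.entry) :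
    ∀ v : State, (∃ i : Int, Outer u₀ others frames len Ar stored room mode ysz e ret i v) →
      ReachVia Lay μ Vorbis.WayInv v (fun w => At11 u₀ others frames len Ar stored room mode ysz e ret w) := by
  apply ReachVia.loop (fun v => (s32 (v.reg .rbp) + 1).toNat)
  intro v hv
  obtain ⟨i, hat⟩ := hv
  refine (outer_body hLay hμ hcode hld8 hld1 hat).trans ?_
  intro w hw
  rcases hw with h11 | ⟨k, mag, ang, hki, hin⟩
  · exact ReachVia.done (Or.inl h11)
  · refine (inner_loop hLay hμ hcode hst4 hld4 k mag ang w ⟨0, hin⟩).mono ?_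
    intro w' ho
    refine Or.inr ⟨⟨(k : Int) - 1, ho⟩, ?_⟩
    show (s32 (w'.reg .rbp) + 1).toNat < (s32 (v.reg .rbp) + 1).toNat
    rw [ho.rbp, hat.rbp]
    omega

/-- **SEGMENT .10**: from `At10` (0x1116af) to `At11` (0x11181f): the walk to the head of the outer loop, then the outer loop
(whose body contains the inner loop). -/
theorem seg10 (hLay : Lay.hi = 0x1000000) (hμ : UserX.MicroOK μ)
    (hcode : HasCodeNat Lay u₀ Vorbis.L.vorbis_decode_packet_rest.entry Vorbis.Code.code_vorbis_decode_packet_rest.nat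
      Vorbis.L.vorbis_decode_packet_rest.size)
    (hld2 : Asan.SmallCheck Lay μ Vorbis.WayInv (Vorbis.CodeOK u₀) [.rax, .rcx, .rdx] 2 Vorbis.L.__asan_load2_noabort.entry)
    (hst4 : Asan.SmallCheck Lay μ Vorbis.WayInv (Vorbis.CodeOK u₀) [.rax, .rcx, .rdx] 4 Vorbis.L.__asan_store4_noabort.entry)
    (hld4 : Asan.SmallCheck Lay μ Vorbis.WayInv (Vorbis.CodeOK u₀) [.rax, .rcx, .rdx] 4 Vorbis.L.__asan_load4_noabort.entry)
    (hld8 : Asan.SmallCheck Lay μ Vorbis.WayInv (Vorbis.CodeOK u₀) [.rax, .rcx, .rdx] 8 Vorbis.L.__asan_load8_noabort.entry)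
    (hld1 : Asan.SmallCheck Lay μ Vorbis.WayInv (Vorbis.CodeOK u₀) [.rax, .rdx] 1 Vorbis.L.__asan_load1_noabort.entry)
    {v : State} (hat : At10 u₀ others frames len Ar stored room mode ysz e ret v) :
    ReachVia Lay μ Vorbis.WayInv v (fun w => At11 u₀ others frames len Ar stored room mode ysz e ret w) :=
  (entry_to_outer hLay hμ hcode hld2 hat).trans
    (fun w hw => outer_loop hLay hμ hcode hst4 hld4 hld8 hld1 w hw)

end walks

end Vorbis.Spec.vorbis_decode_packet_rest_10
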